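-- pv_equiv track=rewrite | github.com/sergey-lb/store-sales | app/lib.py | store_with_worst_daily_sales
-- ===== SOURCE A (Python) =====
-- def store_with_worst_daily_sales(weekly_sales):
--     """
--     >>> store_with_worst_daily_sales([
--     ...     [1, 1, 1, 1, 1, 1, 1],
--     ...     [1, 1, 1, 1, 1],
--     ...     [0, 1, 1, 1, 1],
--     ...     []
--     ... ])
--     [2]
--
--     >>> store_with_worst_daily_sales([
--     ...    [0, 1, 1, 1, 1, 1, 1],
--     ...    [1, 1, 1, 1, 1, 1, 1],
--     ...    [0, 1, 1, 1, 1],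
--     ...    []
--     ... ])
--     [0, 2]
--
--     >>> store_with_worst_daily_sales([])
--     []
--     """
--
--     worst_daily_sales = float("inf");
--     for store_sales in weekly_sales:
--         if len(store_sales) == 0:
--             continue
--         store_sales.sort()
--         worst_store_daily_sales = store_sales[0]
--         if worst_store_daily_sales < worst_daily_sales:
--             worst_daily_sales = worst_store_daily_sales
--
--     result = []
--     for i, store_sales in enumerate(weekly_sales):
--         if len(store_sales) == 0:
--             continue
--         store_sales.sort()
--         worst_store_daily_sales = store_sales[0]
--         if worst_store_daily_sales == worst_daily_sales:
--             result.append(i)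
--
--     return result
-- ===== SOURCE B (Python) =====
-- def store_with_worst_daily_sales(weekly_sales):
--     # Single pass, no sorting: keep the running global minimum and the list of
--     # store indices attaining it, resetting the list whenever a smaller daily
--     # figure appears.  (A sorts each inner list in place; B does not mutate.)
--     best = None
--     result = []
--     for i, store_sales in enumerate(weekly_sales):
--         if len(store_sales) == 0:
--             continue
--         m = min(store_sales)
--         if best is None or m < best:
--             best = m
--             result = [i]
--         elif m == best:
--             result.append(i)
--     return result
-- ===== Notes on version B (the rewrite author's own statement) =====
-- stated objective: simpler
-- what changed: B makes a single pass keeping a running global minimum and the index list attaining it (reset on a new minimum), using min() instead of sorting, replacing A's two scans that each sort every store list and re-derive the minimum; B also does not mutate the inner lists.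
import Mathlib
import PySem

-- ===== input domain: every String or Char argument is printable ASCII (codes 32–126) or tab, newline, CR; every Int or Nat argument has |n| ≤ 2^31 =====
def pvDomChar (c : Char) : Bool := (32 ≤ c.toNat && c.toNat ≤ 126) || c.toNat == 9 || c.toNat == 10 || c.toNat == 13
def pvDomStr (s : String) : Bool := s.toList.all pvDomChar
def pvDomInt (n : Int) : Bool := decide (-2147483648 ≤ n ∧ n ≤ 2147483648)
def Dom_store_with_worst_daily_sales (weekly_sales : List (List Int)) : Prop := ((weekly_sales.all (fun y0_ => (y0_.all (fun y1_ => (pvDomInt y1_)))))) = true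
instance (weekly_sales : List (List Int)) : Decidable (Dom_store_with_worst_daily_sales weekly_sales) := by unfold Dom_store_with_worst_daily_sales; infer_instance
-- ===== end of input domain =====

-- B makes one pass with a running global minimum and the index list attaining it (reset on a new
-- minimum), using min() instead of A's sorting; equivalence is about the RETURN value only — A sorts
-- each inner list in place, B performs no mutation.

-- ===== PORT A =====
def store_with_worst_daily_sales (weekly_sales : List (List Int)) : List Int :=
  -- worst_daily_sales = float("inf") is modelled as `none` (smaller-than-everything never holds)
  let worst : Option Int := weekly_sales.foldl
    (fun w s =>
      if s.length = 0 then w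
      else
        let m := PySem.List.pyGetD (PySem.List.sorted s (fun x => x) false) 0 0
        match w with
        | none => some m
        | some c => if m < c then some m else some c) none
  (PySem.List.enumerate weekly_sales 0).foldl
    (fun r p =>
      if p.2.length = 0 then r
      else
        let m := PySem.List.pyGetD (PySem.List.sorted p.2 (fun x => x) false) 0 0
        match worst with
        | none => r            -- an int never equals float("inf")
        | some c => if m = c then r ++ [p.1] else r) []

-- ===== PORT B =====
def store_with_worst_daily_sales_alt (weekly_sales : List (List Int)) : List Int :=
  let st : Option Int × List Int := (PySem.List.enumerate weekly_sales 0).foldl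
    (fun st p =>
      if p.2.length = 0 then st
      else
        match PySem.List.min? p.2 (fun x => x) with
        | none => st           -- unreachable: p.2 is nonempty here
        | some m =>
          match st.1 with
          | none => (some m, [p.1])
          | some b =>
            if m < b then (some m, [p.1])
            else if m = b then (st.1, st.2 ++ [p.1])
            else st)
    ((none : Option Int), ([] : List Int))
  st.2

-- ===== PRECONDITION & SPEC =====
def Spec_store_with_worst_daily_sales (weekly_sales : List (List Int)) (out : List Int) : Prop := out = store_with_worst_daily_sales_alt weekly_sales
instance (weekly_sales : List (List Int)) (out : List Int) : Decidable (Spec_store_with_worst_daily_sales weekly_sales out) := by unfold Spec_store_with_worst_daily_sales; infer_instance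

-- ===== CLAIM =====
def Claim_equal_store_with_worst_daily_sales : Prop := ∀ (weekly_sales : List (List Int)), Dom_store_with_worst_daily_sales weekly_sales → Spec_store_with_worst_daily_sales weekly_sales (store_with_worst_daily_sales weekly_sales)

-- ===== LEMMAS AND PROOFS =====

-- the worst daily figure of one (nonempty) store, as port A computes it
def mval (s : List Int) : Int := PySem.List.pyGetD (PySem.List.sorted s (fun x => x) false) 0 0

-- indices and worst values of the nonempty stores, starting at index i
def minsL : List (List Int) → Int → List (Int × Int)
  | [], _ => []
  | s :: ws, i => if s.length = 0 then minsL ws (i + 1) else (i, mval s) :: minsL ws (i + 1)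

-- the same without the indices
def valsL : List (List Int) → List Int
  | [] => []
  | s :: ws => if s.length = 0 then valsL ws else mval s :: valsL ws

def stepA (w : Option Int) (m : Int) : Option Int :=
  match w with
  | none => some m
  | some c => if m < c then some m else some c

def stepB (st : Option Int × List Int) (p : Int × Int) : Option Int × List Int :=
  match st.1 with
  | none => (some p.2, [p.1])
  | some b =>
    if p.2 < b then (some p.2, [p.1])
    else if p.2 = b then (st.1, st.2 ++ [p.1])
    else st

lemma map_snd_minsL (ws : List (List Int)) (i : Int) : (minsL ws i).map (·.2) = valsL ws := by
  induction ws generalizing i with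
  | nil => rfl
  | cons s ws ih => simp only [minsL, valsL]; split_ifs <;> simp [ih]

lemma min?_eq_mval (s : List Int) (hs : s ≠ []) :
    PySem.List.min? s (fun x => x) = some (mval s) := by
  obtain ⟨x, t, rfl⟩ := List.exists_cons_of_ne_nil hs
  rw [PySem.List.min?_id_cons]
  congr 1
  have hmem : t.foldl min x ∈ x :: t :=
    PySem.List.min?_mem (by rw [PySem.List.min?_id_cons])
  have hmin : ∀ y ∈ (x :: t), t.foldl min x ≤ y := by
    have := PySem.List.min?_isMin (xs := x :: t) (key := fun y => y)
      (by rw [PySem.List.min?_id_cons])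
    simpa using this
  obtain ⟨m, u, hsort⟩ : ∃ m u, PySem.List.sorted (x :: t) (fun y => y) false = m :: u := by
    cases h : PySem.List.sorted (x :: t) (fun y => y) false with
    | nil => exact absurd ((PySem.List.sorted_eq_nil_iff _ _ _).mp h) (by simp)
    | cons m u => exact ⟨m, u, rfl⟩
  have hm_mem : m ∈ x :: t := by
    have : m ∈ PySem.List.sorted (x :: t) (fun y => y) false := by simp [hsort]
    exact (PySem.List.mem_sorted _ _ _ _).mp this
  have hm_le : ∀ y ∈ (x :: t), m ≤ y := PySem.List.key_head_sorted_le (x :: t) (fun y => y) hsort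
  have h1 : m ≤ t.foldl min x := hm_le _ hmem
  have h2 : t.foldl min x ≤ m := hmin _ hm_mem
  have : m = t.foldl min x := le_antisymm h1 h2
  simp [mval, hsort, PySem.List.pyGetD, PySem.List.pyGet?, PySem.List.pyIdx?, this]

lemma foldA1 (ws : List (List Int)) (w : Option Int) :
    ws.foldl
      (fun w s =>
        if s.length = 0 then w
        else
          let m := PySem.List.pyGetD (PySem.List.sorted s (fun x => x) false) 0 0
          match w with
          | none => some m
          | some c => if m < c then some m else some c) w
    = (valsL ws).foldl stepA w := by
  induction ws generalizing w with
  | nil => rfl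
  | cons s ws ih =>
    simp only [List.foldl, valsL]
    split_ifs with h
    · exact ih w
    · simp only [List.foldl]; exact ih (stepA w (mval s))

lemma foldStepMin (t : List Int) (x : Int) : t.foldl stepA (some x) = some (t.foldl min x) := by
  induction t generalizing x with
  | nil => rfl
  | cons y t ih =>
    simp only [List.foldl, stepA]
    have h : (if y < x then (some y : Option Int) else some x) = some (min x y) := by
      split_ifs <;> (congr 1; omega)
    rw [h, ih]

lemma foldA2 (ws : List (List Int)) (i : Int) (g : Int) (r : List Int) :
    (PySem.List.enumerate ws i).foldl
      (fun r p =>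
        if p.2.length = 0 then r
        else
          match (some g : Option Int) with
          | none => r
          | some c =>
            if PySem.List.pyGetD (PySem.List.sorted p.2 (fun x => x) false) 0 0 = c then r ++ [p.1]
            else r) r
    = r ++ ((minsL ws i).filter (fun p => p.2 == g)).map (·.1) := by
  induction ws generalizing i r with
  | nil => simp [PySem.List.enumerate_nil, minsL]
  | cons s ws ih =>
    rw [PySem.List.enumerate_cons]
    simp only [List.foldl, minsL]
    split_ifs with h hg
    · exact ih (i + 1) r
    · rw [ih (i + 1) (r ++ [i])]
      simp [mval, hg]
    · rw [ih (i + 1) r]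
      simp [mval, hg]

lemma foldA2none (ws : List (List Int)) (i : Int) (r : List Int) :
    (PySem.List.enumerate ws i).foldl
      (fun r (p : Int × List Int) => if p.2.length = 0 then r else r) r = r := by
  induction ws generalizing i r with
  | nil => simp [PySem.List.enumerate_nil]
  | cons s ws ih =>
    rw [PySem.List.enumerate_cons]
    simp only [List.foldl]
    split_ifs <;> exact ih (i + 1) r

lemma foldB_enum (ws : List (List Int)) (i : Int) (st : Option Int × List Int) :
    (PySem.List.enumerate ws i).foldl
      (fun st p =>
        if p.2.length = 0 then st
        else
          match PySem.List.min? p.2 (fun x => x) with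
          | none => st
          | some m =>
            match st.1 with
            | none => (some m, [p.1])
            | some b =>
              if m < b then (some m, [p.1])
              else if m = b then (st.1, st.2 ++ [p.1])
              else st) st
    = (minsL ws i).foldl stepB st := by
  induction ws generalizing i st with
  | nil => simp [PySem.List.enumerate_nil, minsL]
  | cons s ws ih =>
    rw [PySem.List.enumerate_cons]
    simp only [List.foldl, minsL]
    split_ifs with h
    · exact ih (i + 1) st
    · rw [min?_eq_mval s (by intro hn; simp [hn] at h)]
      simp only [List.foldl]
      exact ih (i + 1) _

lemma foldl_min_le (t : List Int) (c : Int) : t.foldl min c ≤ c := by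
  induction t generalizing c with
  | nil => simp
  | cons v t ih => exact le_trans (ih (min c v)) (min_le_left c v)

lemma stepB_some (t : List (Int × Int)) (c : Int) (r : List Int) :
    t.foldl stepB (some c, r) =
      (some ((t.map (·.2)).foldl min c),
       if (t.map (·.2)).foldl min c = c
       then r ++ (t.filter (fun p => p.2 == ((t.map (·.2)).foldl min c))).map (·.1)
       else (t.filter (fun p => p.2 == ((t.map (·.2)).foldl min c))).map (·.1)) := by
  induction t generalizing c r with
  | nil => simp
  | cons p t ih =>
    obtain ⟨i, v⟩ := p
    simp only [List.foldl, List.map, stepB]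
    rcases lt_trichotomy v c with hvc | hvc | hvc
    · rw [if_pos hvc, ih]
      have hg : (t.map (·.2)).foldl min (min c v) = (t.map (·.2)).foldl min v := by
        rw [min_eq_right (le_of_lt hvc)]
      have hle : (t.map (·.2)).foldl min v ≤ v := foldl_min_le _ _
      rw [hg]
      have hne : (t.map (·.2)).foldl min v ≠ c := by omega
      rw [if_neg hne]
      by_cases hgv : (t.map (·.2)).foldl min v = v
      · simp [List.filter, hgv]
      · have hbe : (v == (t.map (·.2)).foldl min v) = false := by
          simp [Ne.symm hgv]
        simp [hbe, hgv]
    · subst hvc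
      rw [if_neg (lt_irrefl v), if_pos rfl, ih]
      have hg : (t.map (·.2)).foldl min (min v v) = (t.map (·.2)).foldl min v := by
        rw [min_self]
      rw [hg]
      have hle : (t.map (·.2)).foldl min v ≤ v := foldl_min_le _ _
      by_cases hgv : (t.map (·.2)).foldl min v = v
      · simp [List.filter, hgv]
      · rw [if_neg hgv, if_neg hgv]
        have hbe : (v == (t.map (·.2)).foldl min v) = false := by
          simp [Ne.symm hgv]
        simp [hbe]
    · rw [if_neg (by omega), if_neg (by omega)]
      rw [ih]
      have hg : (t.map (·.2)).foldl min (min c v) = (t.map (·.2)).foldl min c := by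
        rw [min_eq_left (le_of_lt hvc)]
      rw [hg]
      have hle : (t.map (·.2)).foldl min c ≤ c := foldl_min_le _ _
      have hne : v ≠ (t.map (·.2)).foldl min c := by omega
      have hbe : (v == (t.map (·.2)).foldl min c) = false := by
        simp [hne]
      simp [hbe]

lemma valsL_nil_iff (ws : List (List Int)) (i : Int) : valsL ws = [] ↔ minsL ws i = [] := by
  rw [← map_snd_minsL ws i]
  simp

-- ===== VERDICT =====
theorem store_with_worst_daily_sales_spec : Claim_equal_store_with_worst_daily_sales := by
  intro ws _
  simp only [Spec_store_with_worst_daily_sales, store_with_worst_daily_sales,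
    store_with_worst_daily_sales_alt]
  rw [foldA1, foldB_enum]
  cases hm : minsL ws 0 with
  | nil =>
    have hv : valsL ws = [] := (valsL_nil_iff ws 0).mpr hm
    simp only [hv, List.foldl]
    rw [foldA2none ws 0 []]
  | cons p t =>
    obtain ⟨i0, v0⟩ := p
    have hv : valsL ws = v0 :: t.map (·.2) := by
      rw [← map_snd_minsL ws 0, hm]; rfl
    rw [hv]
    simp only [List.foldl, stepA, stepB]
    rw [foldStepMin, stepB_some]
    rw [foldA2 ws 0 ((t.map (·.2)).foldl min v0) []]
    rw [hm]
    simp only [List.filter, List.nil_append]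
    by_cases hg : (t.map (·.2)).foldl min v0 = v0
    · simp [hg]
    · have hbe : (v0 == (t.map (·.2)).foldl min v0) = false := by
        simp [Ne.symm hg]
      simp [hg, hbe]
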